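-- pv_equiv track=rewrite | github.com/rcatwood/Savu | savu/data/data_structures/preview.py | __add_preview_defaults
-- ===== SOURCE A (Python) =====
-- def __add_preview_defaults(plist):
--     """ Fill in missing values in preview list entries.
--
--     :param: preview list with entries of the form
--         ``start:stop[:step:chunk]``
--     :returns: preview list with missing values replaced by defaults
--     :rtype: list
--     """
--     nEntries = 4
--     diff_len = [(nEntries - len(elem.split(':'))) for elem in plist]
--     all_idx = [i for i in range(len(plist)) if plist[i] == ':']
--     amend = [i for i in range(len(plist)) if diff_len and i not in all_idx]
--     for idx in amend:
--         plist[idx] += ':1'*diff_len[idx]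
--     return plist
-- ===== SOURCE B (Python) =====
-- def __add_preview_defaults(plist):
--     """ Fill in missing values in preview list entries (single pass, in place). """
--     for i, elem in enumerate(plist):
--         if elem != ':':
--             plist[i] += ':1' * (4 - len(elem.split(':')))
--     return plist
-- ===== Notes on version B (the rewrite author's own statement) =====
-- stated objective: simpler
-- what changed: Replaced the three precomputed index/length lists (diff_len, all_idx, amend) and the index-membership filtered loop with one enumerate pass that computes each entry's colon count inline and appends the defaults directly.
import Mathlib
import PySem

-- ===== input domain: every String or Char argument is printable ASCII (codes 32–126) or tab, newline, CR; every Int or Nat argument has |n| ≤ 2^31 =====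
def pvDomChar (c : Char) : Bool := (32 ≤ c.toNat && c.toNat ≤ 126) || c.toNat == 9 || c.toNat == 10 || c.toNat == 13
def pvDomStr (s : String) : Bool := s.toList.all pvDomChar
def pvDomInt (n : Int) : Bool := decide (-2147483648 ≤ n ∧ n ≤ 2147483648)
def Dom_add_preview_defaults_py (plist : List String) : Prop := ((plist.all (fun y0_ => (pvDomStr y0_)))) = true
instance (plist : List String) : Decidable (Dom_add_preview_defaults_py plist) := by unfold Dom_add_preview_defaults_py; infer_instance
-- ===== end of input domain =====

-- B replaces A's three intermediate lists and filtered index loop by one direct pass; return value only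
-- (both Pythons mutate the argument list in place the same way).

-- ===== PORT A =====
def add_preview_defaults_py (plist : List String) : List String :=
  let diff_len : List Int := plist.map (fun elem => (4 : Int) - (PySem.Chars.splitOn elem.toList [':']).length)
  let all_idx : List Nat := (List.range plist.length).filter (fun i => plist.getD i "" == ":")
  let amend : List Nat := (List.range plist.length).filter
    (fun i => decide (diff_len ≠ []) && !(all_idx.contains i))
  amend.foldl (fun acc idx =>
    acc.set idx (acc.getD idx "" ++ String.ofList (PySem.List.pyRepeat [':', '1'] (diff_len.getD idx 0)))) plist

-- ===== PORT B =====
def add_preview_defaults_py_alt (plist : List String) : List String :=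
  plist.map (fun elem =>
    if elem == ":" then elem
    else elem ++ String.ofList (PySem.List.pyRepeat [':', '1'] ((4 : Int) - (PySem.Chars.splitOn elem.toList [':']).length)))

-- ===== PRECONDITION & SPEC =====
def Spec_add_preview_defaults_py (plist : List String) (out : List String) : Prop := out = add_preview_defaults_py_alt plist
instance (plist : List String) (out : List String) : Decidable (Spec_add_preview_defaults_py plist out) := by unfold Spec_add_preview_defaults_py; infer_instance

-- ===== CLAIM (what is proved, stated in full; the proofs are below) =====
def Claim_equal_add_preview_defaults_py : Prop := ∀ (plist : List String), Dom_add_preview_defaults_py plist → Spec_add_preview_defaults_py plist (add_preview_defaults_py plist)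

-- ===== LEMMAS AND PROOFS =====

-- The generic loop of port A: each step rewrites position i from its current value only.
def pvStep (upd : Nat → String → String) (acc : List String) (i : Nat) : List String :=
  acc.set i (upd i (acc.getD i ""))

theorem pvFold_length (upd : Nat → String → String) :
    ∀ (idxs : List Nat) (l : List String), (idxs.foldl (pvStep upd) l).length = l.length := by
  intro idxs
  induction idxs with
  | nil => intro l; rfl
  | cons i rest ih => intro l; simp [List.foldl, ih, pvStep]

theorem pvFold_getD (upd : Nat → String → String) :
    ∀ (idxs : List Nat) (l : List String), idxs.Nodup → ∀ j : Nat, j < l.length →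
      (idxs.foldl (pvStep upd) l).getD j "" =
        if j ∈ idxs then upd j (l.getD j "") else l.getD j "" := by
  intro idxs
  induction idxs with
  | nil => intro l _ j hj; simp
  | cons i rest ih =>
    intro l hnd j hj
    simp only [List.nodup_cons] at hnd
    rw [List.foldl_cons, ih _ hnd.2 j (by simp [pvStep]; omega)]
    by_cases hji : j = i
    · subst hji
      have hjr : j ∉ rest := hnd.1
      simp [hjr, pvStep, List.getD, hj]
    · have hg : (pvStep upd l i)[j]? = l[j]? := by
        simp [pvStep, List.getElem?_set_ne (by omega : i ≠ j)]
      by_cases hjr : j ∈ rest <;> simp [hjr, hji, List.getD, hg]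

theorem add_preview_defaults_py_eq (plist : List String) :
    add_preview_defaults_py plist = add_preview_defaults_py_alt plist := by
  unfold add_preview_defaults_py add_preview_defaults_py_alt
  set diff_len : List Int :=
    plist.map (fun elem => (4 : Int) - (PySem.Chars.splitOn elem.toList [':']).length) with hdl
  set upd : Nat → String → String :=
    fun idx s => s ++ String.ofList (PySem.List.pyRepeat [':', '1'] (diff_len.getD idx 0)) with hupd
  set all_idx : List Nat :=
    (List.range plist.length).filter (fun i => plist.getD i "" == ":") with hall
  set amend : List Nat := (List.range plist.length).filter
    (fun i => decide (diff_len ≠ []) && !(all_idx.contains i)) with hamend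
  show amend.foldl (pvStep upd) plist = _
  have hnd : amend.Nodup := List.Nodup.filter _ List.nodup_range
  have hlen : (amend.foldl (pvStep upd) plist).length = plist.length := pvFold_length upd amend plist
  apply List.ext_getElem
  · simpa using hlen
  intro j hA hB
  have hj : j < plist.length := by simpa using hB
  have hne : plist ≠ [] := by intro h; rw [h] at hj; exact absurd hj (by simp)
  have hdlne : diff_len ≠ [] := by
    rw [hdl]; simpa using hne
  have hmem : j ∈ amend ↔ ¬ (plist.getD j "" = ":") := by
    rw [hamend, List.mem_filter]
    simp [hall, List.mem_filter, List.mem_range, hj, hdlne]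
  have hgd := pvFold_getD upd amend plist hnd j hj
  have hres : (amend.foldl (pvStep upd) plist)[j] = (amend.foldl (pvStep upd) plist).getD j "" := by
    rw [List.getD_eq_getElem?_getD, List.getElem?_eq_getElem (by omega), Option.getD_some]
  have hpd : plist.getD j "" = plist[j] := by
    rw [List.getD_eq_getElem?_getD, List.getElem?_eq_getElem hj, Option.getD_some]
  have hdlj : diff_len.getD j 0 = (4 : Int) - (PySem.Chars.splitOn plist[j].toList [':']).length := by
    rw [hdl, List.getD_eq_getElem?_getD, List.getElem?_map, List.getElem?_eq_getElem hj]
    rfl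
  rw [hres, hgd, List.getElem_map]
  by_cases hcolon : plist[j] = ":"
  · have hnotmem : ¬ j ∈ amend := by rw [hmem, hpd]; simp [hcolon]
    rw [if_neg hnotmem, hpd, if_pos (by simp [hcolon]), hcolon]
  · have hm : j ∈ amend := by rw [hmem, hpd]; simp [hcolon]
    rw [if_pos hm, if_neg (by simp [hcolon]), hupd]
    show plist.getD j "" ++ _ = _
    rw [hpd, hdlj]

-- ===== VERDICT (by name: the statement is the Claim_ definition above) =====
theorem add_preview_defaults_py_spec : Claim_equal_add_preview_defaults_py := by
  intro plist _
  exact add_preview_defaults_py_eq plist
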